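-- pv_equiv track=rewrite | github.com/Jie-wzj/fuguo_project | preprocess/merge.py | getTTM
-- ===== SOURCE A (Python) =====
-- def getTTM(time):
--     year = time // 10000
--     month = (time % 10000) // 100
--     day = time % 100
--     report_date = [331, 630, 930, 1231]
--     if month < 3 or month == 3 and day != 31:
--         ttm = [(year - 1) * 10000 + report_date[i] for i in range(4)]
--     elif month < 6 or month == 6 and day != 30:
--         ttm = [(year - 1) * 10000 + report_date[i] for i in range(1, 4)] + [year * 10000 + report_date[i] for i in range(0, 1)]
--     elif month < 9 or month == 9 and day != 30:
--         ttm = [(year - 1) * 10000 + report_date[i] for i in range(2, 4)] + [year * 10000 + report_date[i] for i in range(0, 2)]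
--     else:
--         ttm = [(year - 1) * 10000 + report_date[i] for i in range(3, 4)] + [year * 10000 + report_date[i] for i in range(0, 3)]
--     return ttm
-- ===== SOURCE B (Python) =====
-- def getTTM(time):
--     year = time // 10000
--     month = (time % 10000) // 100
--     day = time % 100
--     # chronological timeline: every quarter-end of last year has been reported;
--     # append each quarter-end of the current year that has already been reached
--     timeline = [(year - 1) * 10000 + q for q in (331, 630, 930, 1231)]
--     for q, qm, qd in ((331, 3, 31), (630, 6, 30), (930, 9, 30)):
--         if month > qm or (month == qm and day == qd):
--             timeline.append(year * 10000 + q)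
--     # the trailing twelve months are the last four report dates on the timeline
--     return timeline[-4:]
-- ===== Notes on version B (the rewrite author's own statement) =====
-- stated objective: alternative
-- what changed: Replaces the four-way if/elif cascade (each branch assembling its own pair of comprehensions) with a chronological timeline build: all four prior-year quarter-ends plus each reached current-year quarter-end, returning the last four via a slice.
import Mathlib
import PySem

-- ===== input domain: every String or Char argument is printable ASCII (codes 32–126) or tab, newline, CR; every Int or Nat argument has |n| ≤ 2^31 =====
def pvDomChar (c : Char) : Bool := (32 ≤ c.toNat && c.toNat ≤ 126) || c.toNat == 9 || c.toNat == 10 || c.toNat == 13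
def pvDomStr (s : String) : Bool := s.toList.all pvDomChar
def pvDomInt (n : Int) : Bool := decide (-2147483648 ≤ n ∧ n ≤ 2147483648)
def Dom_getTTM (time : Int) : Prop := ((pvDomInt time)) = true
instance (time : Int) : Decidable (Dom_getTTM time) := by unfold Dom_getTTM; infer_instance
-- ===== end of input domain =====

-- B builds a chronological timeline of report dates (last year's four, plus each reached
-- current-year quarter-end) and returns its last four, instead of A's if/elif cascade
-- (objective: alternative decomposition, same cost).


-- ===== PORT A =====
def getTTM (time : Int) : List Int :=
  let year := PySem.Int.floordiv time 10000
  let month := PySem.Int.floordiv (PySem.Int.mod time 10000) 100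
  let day := PySem.Int.mod time 100
  let report_date : List Int := [331, 630, 930, 1231]
  if month < 3 ∨ (month = 3 ∧ day ≠ 31) then
    (PySem.List.pyRange 0 4 1).map (fun i => (year - 1) * 10000 + PySem.List.pyGetD report_date i 0)
  else if month < 6 ∨ (month = 6 ∧ day ≠ 30) then
    (PySem.List.pyRange 1 4 1).map (fun i => (year - 1) * 10000 + PySem.List.pyGetD report_date i 0)
      ++ (PySem.List.pyRange 0 1 1).map (fun i => year * 10000 + PySem.List.pyGetD report_date i 0)
  else if month < 9 ∨ (month = 9 ∧ day ≠ 30) then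
    (PySem.List.pyRange 2 4 1).map (fun i => (year - 1) * 10000 + PySem.List.pyGetD report_date i 0)
      ++ (PySem.List.pyRange 0 2 1).map (fun i => year * 10000 + PySem.List.pyGetD report_date i 0)
  else
    (PySem.List.pyRange 3 4 1).map (fun i => (year - 1) * 10000 + PySem.List.pyGetD report_date i 0)
      ++ (PySem.List.pyRange 0 3 1).map (fun i => year * 10000 + PySem.List.pyGetD report_date i 0)

-- ===== PORT B =====
def getTTM_alt (time : Int) : List Int :=
  let year := PySem.Int.floordiv time 10000
  let month := PySem.Int.floordiv (PySem.Int.mod time 10000) 100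
  let day := PySem.Int.mod time 100
  let timeline0 : List Int := ([331, 630, 930, 1231] : List Int).map (fun q => (year - 1) * 10000 + q)
  let timeline := ([((331:Int), (3:Int), (31:Int)), (630, 6, 30), (930, 9, 30)] : List (Int × Int × Int)).foldl
    (fun acc t => if month > t.2.1 ∨ (month = t.2.1 ∧ day = t.2.2) then acc ++ [year * 10000 + t.1] else acc)
    timeline0
  PySem.List.slice timeline (some (-4)) none

-- ===== PRECONDITION & SPEC =====
def Spec_getTTM (time : Int) (out : List Int) : Prop := out = getTTM_alt time
instance (time : Int) (out : List Int) : Decidable (Spec_getTTM time out) := by unfold Spec_getTTM; infer_instance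

-- ===== CLAIM (what is proved, stated in full; the proofs are below) =====
def Claim_equal_getTTM : Prop := ∀ (time : Int), Dom_getTTM time → Spec_getTTM time (getTTM time)

-- ===== LEMMAS AND PROOFS =====

-- ===== VERDICT (by name: the statement is the Claim_ definition above) =====
theorem getTTM_spec : Claim_equal_getTTM := by
  intro time _
  unfold Spec_getTTM getTTM getTTM_alt
  dsimp only
  generalize PySem.Int.floordiv time 10000 = y
  generalize PySem.Int.floordiv (PySem.Int.mod time 10000) 100 = m
  generalize PySem.Int.mod time 100 = d
  simp only [List.foldl, List.map]
  split_ifs <;>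
    first
      | omega
      | (rw [PySem.List.slice_from_neg_ofNat _ 4 (by omega)]
         norm_num [show PySem.List.pyRange 0 4 1 = [0,1,2,3] from by decide,
           show PySem.List.pyRange 1 4 1 = [1,2,3] from by decide,
           show PySem.List.pyRange 2 4 1 = [2,3] from by decide,
           show PySem.List.pyRange 3 4 1 = [3] from by decide,
           show PySem.List.pyRange 0 1 1 = [0] from by decide,
           show PySem.List.pyRange 0 2 1 = [0,1] from by decide,
           show PySem.List.pyRange 0 3 1 = [0,1,2] from by decide,
           PySem.List.pyGetD_ofNat'])
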